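-- pv_equiv track=rewrite | github.com/abbasmoosajee07/AlgoVault | eldarverse/sep_25/Problem_G/eldarverse-sep-25-G.py | construct_maxD_permutation
-- ===== SOURCE A (Python) =====
-- def construct_maxD_permutation(N: int):
--     """Return a permutation of 1..N whose min adjacent diff = floor(N/2)."""
--     m = N // 2
--     left_start = m + (N % 2)
--     left = list(range(left_start, 0, -1))
--     right = list(range(N, left_start, -1))
--
--     perm = []
--     # interleave left and right: left[i], right[i], ...
--     for i in range(max(len(left), len(right))):
--         if i < len(left):
--             perm.append(str(left[i]))
--         if i < len(right):
--             perm.append(str(right[i]))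
--     return m, ' '.join(perm)
-- ===== SOURCE B (Python) =====
-- def construct_maxD_permutation(N: int):
--     """Return a permutation of 1..N whose min adjacent diff = floor(N/2)."""
--     m = N // 2
--     left_start = m + (N % 2)
--     # scatter: place each value v directly into its final slot
--     res = [''] * N
--     for v in range(1, N + 1):
--         if v <= left_start:
--             res[2 * (left_start - v)] = str(v)
--         else:
--             res[2 * (N - v) + 1] = str(v)
--     return m, ' '.join(res)
-- ===== Notes on version B (the rewrite author's own statement) =====
-- stated objective: alternative
-- what changed: Instead of materialising two descending ranges and interleaving them slot by slot, B preallocates the output array and scatters each value directly into its closed-form final position, an inverse value-to-position mapping rather than a position-to-value interleave.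
import Mathlib
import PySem

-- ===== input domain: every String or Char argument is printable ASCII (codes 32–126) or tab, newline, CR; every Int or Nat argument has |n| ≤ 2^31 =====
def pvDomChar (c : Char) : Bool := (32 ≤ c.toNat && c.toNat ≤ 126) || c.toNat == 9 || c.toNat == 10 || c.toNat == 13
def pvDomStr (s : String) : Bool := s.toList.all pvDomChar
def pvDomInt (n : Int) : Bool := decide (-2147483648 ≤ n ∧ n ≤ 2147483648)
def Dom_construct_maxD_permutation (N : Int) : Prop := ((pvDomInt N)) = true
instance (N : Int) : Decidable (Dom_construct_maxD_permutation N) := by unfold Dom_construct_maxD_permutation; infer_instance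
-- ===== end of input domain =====

-- B replaces A's build-two-lists-and-interleave by an inverse mapping: it preallocates
-- the output array and scatters each value 1..N directly into its final slot (alternative).


-- ===== PORT A =====
def construct_maxD_permutation (N : Int) : Int × String :=
  let m := PySem.Int.floordiv N 2
  let left_start := m + PySem.Int.mod N 2
  let left := PySem.List.pyRange left_start 0 (-1)
  let right := PySem.List.pyRange N left_start (-1)
  let perm := (PySem.List.pyRange 0 ((max left.length right.length : Nat) : Int) 1).foldl
    (fun acc i =>
      let acc' := if i < (left.length : Int) then acc ++ [PySem.Int.toStr (PySem.List.pyGetD left i 0)] else acc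
      if i < (right.length : Int) then acc' ++ [PySem.Int.toStr (PySem.List.pyGetD right i 0)] else acc')
    []
  (m, PySem.Str.join " " perm)

-- ===== PORT B =====
-- Python's list assignment res[pos] = str(v) is ported as List.set pos.toNat; on every
-- reachable iteration pos is nonnegative and < len(res), where the two agree exactly.
def construct_maxD_permutation_alt (N : Int) : Int × String :=
  let m := PySem.Int.floordiv N 2
  let left_start := m + PySem.Int.mod N 2
  let res := (PySem.List.pyRange 1 (N + 1) 1).foldl
    (fun res v =>
      if v ≤ left_start then res.set (2 * (left_start - v)).toNat (PySem.Int.toStr v)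
      else res.set (2 * (N - v) + 1).toNat (PySem.Int.toStr v))
    (List.replicate N.toNat "")
  (m, PySem.Str.join " " res)

-- ===== PRECONDITION & SPEC =====
def Spec_construct_maxD_permutation (N : Int) (out : Int × String) : Prop := out = construct_maxD_permutation_alt N
instance (N : Int) (out : Int × String) : Decidable (Spec_construct_maxD_permutation N out) := by unfold Spec_construct_maxD_permutation; infer_instance

-- ===== CLAIM (what is proved, stated in full; the proofs are below) =====
def Claim_equal_construct_maxD_permutation : Prop := ∀ (N : Int), Dom_construct_maxD_permutation N → Spec_construct_maxD_permutation N (construct_maxD_permutation N)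

-- ===== LEMMAS AND PROOFS =====

-- proof-only middle form: each output slot by its index parity
def pvParity (N : Int) : Int × String :=
  let m := PySem.Int.floordiv N 2
  let left_start := m + PySem.Int.mod N 2
  (m, PySem.Str.join " "
    ((PySem.List.pyRange 0 N 1).map (fun i =>
      if PySem.Int.mod i 2 = 0 then PySem.Int.toStr (left_start - PySem.Int.floordiv i 2)
      else PySem.Int.toStr (N - PySem.Int.floordiv i 2))))

-- B's slot for value v, and the value sitting in slot j
def pvPos (n L : Nat) (v : Int) : Nat :=
  (if v ≤ (L : Int) then 2 * ((L : Int) - v) else 2 * ((n : Int) - v) + 1).toNat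
def pvVal (n L : Nat) (j : Nat) : Int :=
  if j % 2 = 0 then (L : Int) - ((j / 2 : Nat) : Int) else (n : Int) - ((j / 2 : Nat) : Int)

theorem pv_pos_val (n L : Nat) (hL : L = n / 2 + n % 2) (j : Nat) (hj : j < n) :
    pvPos n L (pvVal n L j) = j ∧ 1 ≤ pvVal n L j ∧ pvVal n L j ≤ n := by
  unfold pvPos pvVal
  split_ifs <;> omega

theorem pv_val_pos (n L : Nat) (hL : L = n / 2 + n % 2) (v : Int) (h1 : 1 ≤ v) (h2 : v ≤ n) :
    pvVal n L (pvPos n L v) = v ∧ pvPos n L v < n := by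
  unfold pvPos pvVal
  split_ifs <;> omega

-- the scatter loop after t values: slot j is filled iff its value pvVal j is ≤ t
theorem pv_scatter (n L : Nat) (hL : L = n / 2 + n % 2) :
    ∀ t : Nat, t ≤ n →
      (List.range t).foldl
        (fun res k => res.set (pvPos n L (1 + (k : Int))) (PySem.Int.toStr (1 + (k : Int))))
        (List.replicate n "")
      = (List.range n).map (fun j => if pvVal n L j ≤ (t : Int) then PySem.Int.toStr (pvVal n L j) else "") := by
  intro t
  induction t with
  | zero =>
      intro _
      apply List.ext_getElem (by simp)
      intro j h1 h2
      have hv := pv_pos_val n L hL j (by simpa using h1)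
      simp only [List.range_zero, List.foldl_nil, List.getElem_replicate, List.getElem_map,
        List.getElem_range]
      rw [if_neg (by omega)]
  | succ t ih =>
      intro ht
      rw [List.range_succ, List.foldl_append, ih (by omega), List.foldl_cons, List.foldl_nil]
      apply List.ext_getElem (by simp)
      intro j h1 h2
      have hlen : j < n := by simpa using h2
      have hvp := pv_val_pos n L hL (1 + (t : Int)) (by omega) (by omega)
      rw [List.getElem_set]
      simp only [List.getElem_map, List.getElem_range]
      by_cases hje : pvPos n L (1 + (t : Int)) = j
      · rw [if_pos hje]
        have : pvVal n L j = 1 + (t : Int) := by rw [← hje]; exact hvp.1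
        rw [this, if_pos (by omega)]
      · rw [if_neg hje]
        have hv := pv_pos_val n L hL j hlen
        by_cases hc : pvVal n L j ≤ (t : Int)
        · rw [if_pos hc, if_pos (by omega)]
        · rw [if_neg hc, if_neg ?_]
          intro hle
          have : pvVal n L j = 1 + (t : Int) := by omega
          exact hje (by rw [← this, hv.1])

-- B equals the parity middle form
theorem pv_B_parity : ∀ (N : Int), construct_maxD_permutation_alt N = pvParity N := by
  intro N
  by_cases hneg : N < 0
  · simp only [construct_maxD_permutation_alt, pvParity]
    rw [PySem.List.pyRange_one_eq_nil (by omega), PySem.List.pyRange_one_eq_nil (le_of_lt hneg)]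
    have : N.toNat = 0 := by omega
    simp [this]
  · rw [not_lt] at hneg
    obtain ⟨n, rfl⟩ := Int.eq_ofNat_of_zero_le hneg
    set L : Nat := n / 2 + n % 2 with hLdef
    have hmN : PySem.Int.floordiv (n : Int) 2 = ((n / 2 : Nat) : Int) := by
      exact_mod_cast PySem.Int.floordiv_natCast n 2
    have hmodN : PySem.Int.mod (n : Int) 2 = ((n % 2 : Nat) : Int) := by
      exact_mod_cast PySem.Int.mod_natCast n 2
    have hlsN : ((n / 2 : Nat) : Int) + ((n % 2 : Nat) : Int) = (L : Int) := by
      push_cast [hLdef]; ring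
    simp only [construct_maxD_permutation_alt, pvParity, hmN, hmodN, hlsN]
    -- the values range 1..n
    rw [PySem.List.pyRange_one 1 ((n : Int) + 1)]
    have h1 : ((n : Int) + 1 - 1).toNat = n := by omega
    have h2 : ((n : Int)).toNat = n := by omega
    rw [h1, h2, List.foldl_map]
    -- the scatter body is set at pvPos
    have hbody : (fun (res : List String) (k : Nat) =>
        if (1 : Int) + (k : Int) ≤ (L : Int) then
          res.set (2 * ((L : Int) - (1 + (k : Int)))).toNat (PySem.Int.toStr (1 + (k : Int)))
        else res.set (2 * ((n : Int) - (1 + (k : Int))) + 1).toNat (PySem.Int.toStr (1 + (k : Int))))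
        = fun res k => res.set (pvPos n L (1 + (k : Int))) (PySem.Int.toStr (1 + (k : Int))) := by
      funext res k
      unfold pvPos
      split_ifs <;> rfl
    rw [hbody, pv_scatter n L rfl n (le_refl n)]
    -- slot j holds pvVal j
    rw [List.map_congr_left (fun j hj => by
      rw [if_pos (pv_pos_val n L rfl j (List.mem_range.mp hj)).2.2])]
    -- the parity map is the same function
    rw [PySem.List.pyRange_one 0 (n : Int)]
    have h3 : ((n : Int) - 0).toNat = n := by omega
    rw [h3, List.map_map]
    refine congrArg (Prod.mk _) (congrArg (PySem.Str.join " ") (List.map_congr_left fun j _ => ?_))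
    have hmk : PySem.Int.mod ((0 : Int) + (j : Int)) 2 = ((j % 2 : Nat) : Int) := by
      rw [zero_add]; exact_mod_cast PySem.Int.mod_natCast j 2
    have hdk : PySem.Int.floordiv ((0 : Int) + (j : Int)) 2 = ((j / 2 : Nat) : Int) := by
      rw [zero_add]; exact_mod_cast PySem.Int.floordiv_natCast j 2
    simp only [Function.comp, hmk, hdk, pvVal]
    by_cases h : j % 2 = 0
    · have h2' : ((j % 2 : Nat) : Int) = 0 := by exact_mod_cast h
      rw [if_pos h, if_pos h2']
    · have h2' : ¬ ((j % 2 : Nat) : Int) = 0 := by exact_mod_cast h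
      rw [if_neg h, if_neg h2']

-- interleaving two closed-form streams equals one parity-indexed stream
theorem pv_interleave (f g : Nat → String) :
    ∀ (R : Nat),
      (List.range R).flatMap (fun k => [f k, g k]) =
      (List.range (2 * R)).map (fun j => if j % 2 = 0 then f (j / 2) else g (j / 2)) := by
  intro R
  induction R with
  | zero => simp
  | succ r ih =>
      have h2 : 2 * (r + 1) = (2 * r + 1) + 1 := by omega
      rw [List.range_succ, List.flatMap_append, ih, h2, List.range_succ, List.range_succ]
      have he : (2 * r) % 2 = 0 := by omega
      have ho : ¬ (2 * r + 1) % 2 = 0 := by omega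
      have he2 : 2 * r / 2 = r := by omega
      have ho2 : (2 * r + 1) / 2 = r := by omega
      simp [List.map_append, he, he2, ho2]

-- the two guarded appends of one loop iteration, as a single extend
theorem pv_body (A B : Int → List String) (L R : Int) :
    (fun (acc : List String) (i : Int) =>
      if i < R then (if i < L then acc ++ A i else acc) ++ B i
      else (if i < L then acc ++ A i else acc))
    = fun acc i => acc ++ ((if i < L then A i else []) ++ (if i < R then B i else [])) := by
  funext acc i
  split_ifs <;> simp

-- A equals the parity middle form
theorem pv_A_parity : ∀ (N : Int), construct_maxD_permutation N = pvParity N := by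
  intro N
  by_cases hneg : N < 0
  · have hm : PySem.Int.floordiv N 2 ≤ 0 := by
      have := PySem.Int.floordiv_mul_add_mod N 2
      have := PySem.Int.mod_nonneg N (b := 2) (by omega)
      omega
    have hmod : PySem.Int.mod N 2 < 2 := PySem.Int.mod_lt N (by omega)
    have hmod0 : 0 ≤ PySem.Int.mod N 2 := PySem.Int.mod_nonneg N (by omega)
    have hdm := PySem.Int.floordiv_mul_add_mod N 2
    simp only [construct_maxD_permutation, pvParity]
    rw [PySem.List.pyRange_neg_one_eq_nil (by omega),
        PySem.List.pyRange_neg_one_eq_nil (by omega)]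
    simp only [List.length_nil, Nat.max_self, Nat.cast_zero]
    rw [PySem.List.pyRange_one_eq_nil (le_refl 0),
        PySem.List.pyRange_one_eq_nil (le_of_lt hneg)]
    simp
  · rw [not_lt] at hneg
    obtain ⟨n, rfl⟩ := Int.eq_ofNat_of_zero_le hneg
    set L : Nat := n / 2 + n % 2 with hL
    set R : Nat := n / 2 with hR
    have hmN : PySem.Int.floordiv (n : Int) 2 = (R : Int) := by
      exact_mod_cast PySem.Int.floordiv_natCast n 2
    have hmodN : PySem.Int.mod (n : Int) 2 = ((n % 2 : Nat) : Int) := by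
      exact_mod_cast PySem.Int.mod_natCast n 2
    have hlsN : (R : Int) + ((n % 2 : Nat) : Int) = (L : Int) := by
      push_cast [hL, hR]; ring
    simp only [construct_maxD_permutation, pvParity, hmN, hmodN, hlsN]
    rw [PySem.List.pyRange_neg_one, PySem.List.pyRange_neg_one]
    have hLL : ((L : Int) - 0).toNat = L := by omega
    have hRR : ((n : Int) - (L : Int)).toNat = R := by omega
    rw [hLL, hRR]
    simp only [List.length_map, List.length_range]
    have hmax : max L R = L := by omega
    rw [hmax]
    rw [pv_body (fun i => [PySem.Int.toStr (PySem.List.pyGetD ((List.range L).map (fun (j : Nat) => (L : Int) - (j : Int))) i 0)])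
                (fun i => [PySem.Int.toStr (PySem.List.pyGetD ((List.range R).map (fun (j : Nat) => (n : Int) - (j : Int))) i 0)])
                ((L : Nat) : Int) ((R : Nat) : Int)]
    rw [PySem.List.foldl_append_eq_flatMap, List.nil_append]
    rw [PySem.List.pyRange_one 0 ((L : Nat) : Int), PySem.List.pyRange_one 0 (n : Int)]
    have hLt : (((L : Nat) : Int) - 0).toNat = L := by omega
    have hnt : ((n : Int) - 0).toNat = n := by omega
    rw [hLt, hnt, List.flatMap_map, List.map_map]
    have hA : ∀ k ∈ List.range L,
        ((if (0 : Int) + (k : Int) < ((L : Nat) : Int) then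
              [PySem.Int.toStr (PySem.List.pyGetD ((List.range L).map (fun (j : Nat) => (L : Int) - (j : Int))) ((0 : Int) + (k : Int)) 0)] else []) ++
         (if (0 : Int) + (k : Int) < ((R : Nat) : Int) then
              [PySem.Int.toStr (PySem.List.pyGetD ((List.range R).map (fun (j : Nat) => (n : Int) - (j : Int))) ((0 : Int) + (k : Int)) 0)] else []))
        = (if k < R then [PySem.Int.toStr ((L : Int) - (k : Int)), PySem.Int.toStr ((n : Int) - (k : Int))]
           else [PySem.Int.toStr ((L : Int) - (k : Int))]) := by
      intro k hk
      have hkL : k < L := List.mem_range.mp hk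
      have hkLi : ((k : Nat) : Int) < ((L : Nat) : Int) := by exact_mod_cast hkL
      simp only [zero_add, if_pos hkLi]
      rw [PySem.List.pyGetD_natCast, List.getD_eq_getElem _ _ (by simpa using hkL)]
      by_cases h : k < R
      · have hlt : ((k : Nat) : Int) < ((R : Nat) : Int) := by exact_mod_cast h
        rw [if_pos hlt, if_pos h, PySem.List.pyGetD_natCast,
            List.getD_eq_getElem _ _ (by simpa using h)]
        simp
      · have hlt : ¬ ((k : Nat) : Int) < ((R : Nat) : Int) := by exact_mod_cast h
        rw [if_neg hlt, if_neg h]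
        simp
    rw [List.flatMap_congr hA]
    have hB : ∀ k ∈ List.range n,
        ((fun i => if PySem.Int.mod i 2 = 0 then PySem.Int.toStr ((L : Int) - PySem.Int.floordiv i 2)
                   else PySem.Int.toStr ((n : Int) - PySem.Int.floordiv i 2)) ∘
          (fun k : Nat => (0 : Int) + (k : Int))) k
        = (if k % 2 = 0 then PySem.Int.toStr ((L : Int) - ((k / 2 : Nat) : Int))
           else PySem.Int.toStr ((n : Int) - ((k / 2 : Nat) : Int))) := by
      intro k _
      have hmk : PySem.Int.mod (k : Int) 2 = ((k % 2 : Nat) : Int) := by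
        exact_mod_cast PySem.Int.mod_natCast k 2
      have hdk : PySem.Int.floordiv (k : Int) 2 = ((k / 2 : Nat) : Int) := by
        exact_mod_cast PySem.Int.floordiv_natCast k 2
      simp only [Function.comp, zero_add, hmk, hdk]
      by_cases h : k % 2 = 0
      · have h2 : ((k % 2 : Nat) : Int) = 0 := by exact_mod_cast h
        rw [if_pos h2, if_pos h]
      · have h2 : ¬ ((k % 2 : Nat) : Int) = 0 := by exact_mod_cast h
        rw [if_neg h2, if_neg h]
    rw [List.map_congr_left hB]
    by_cases hpar : n % 2 = 0
    · have hLR : L = R := by omega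
      have hn2 : n = 2 * R := by omega
      rw [hn2, hLR]
      rw [show (List.range R).flatMap
            (fun (k : Nat) => if k < R then
              [PySem.Int.toStr ((R : Int) - (k : Int)), PySem.Int.toStr (((2 * R : Nat) : Int) - (k : Int))]
              else [PySem.Int.toStr ((R : Int) - (k : Int))]) =
          (List.range R).flatMap
            (fun (k : Nat) => [PySem.Int.toStr ((R : Int) - (k : Int)), PySem.Int.toStr (((2 * R : Nat) : Int) - (k : Int))])
          from List.flatMap_congr (fun k hk => by rw [if_pos (List.mem_range.mp hk)])]
      rw [pv_interleave]
    · have hLR : L = R + 1 := by omega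
      have hn2 : n = 2 * R + 1 := by omega
      rw [hLR, List.range_succ, List.flatMap_append]
      rw [show (List.range R).flatMap
            (fun (k : Nat) => if k < R then
              [PySem.Int.toStr (((R + 1 : Nat) : Int) - (k : Int)), PySem.Int.toStr ((n : Int) - (k : Int))]
              else [PySem.Int.toStr (((R + 1 : Nat) : Int) - (k : Int))]) =
          (List.range R).flatMap
            (fun (k : Nat) => [PySem.Int.toStr (((R + 1 : Nat) : Int) - (k : Int)), PySem.Int.toStr ((n : Int) - (k : Int))])
          from List.flatMap_congr (fun k hk => by rw [if_pos (List.mem_range.mp hk)])]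
      rw [pv_interleave, hn2, List.range_succ, List.map_append]
      have he : (2 * R) % 2 = 0 := by omega
      have he2 : 2 * R / 2 = R := by omega
      simp [he]

-- ===== VERDICT (by name: the statement is the Claim_ definition above) =====
theorem construct_maxD_permutation_spec : Claim_equal_construct_maxD_permutation := by
  intro N _
  unfold Spec_construct_maxD_permutation
  rw [pv_A_parity N, pv_B_parity N]
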